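-- pv_equiv track=rewrite | github.com/Hojott/tira | vko7/components.py | count
-- ===== SOURCE A (Python) =====
-- def count(n):
--     components = set()
--     curves = dict()
--     for i in range(2, n+1):
--         curves[i] = []
--
--     for i in range(2, n+1):
--         for j in range(i+1, n+1):
--             if not j % i:
--                 curves[i].append(j)
--                 curves[j].append(i)
--
--     places_been: set
--     def recursive(a):
--         places_been.add(a)
--         if a in components:
--             return False
--         for dest in curves[a]:
--             if dest in places_been:
--                 continue
--
--             if not recursive(dest):
--                 return False
--
--         return True
--
--
--     for i in curves:
--         places_been = set()
--         if recursive(i):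
--             components.add(i)
--
--     return len(components)
-- ===== SOURCE B (Python) =====
-- # Connected components of the divisibility graph on 2..n, computed arithmetically:
-- # the component structure is {2}'s big block (all composites and primes p with 2p <= n)
-- # plus one singleton component for each prime p with 2p > n.  So the answer is
-- # 1 + #{primes in (n//2, n]} for n >= 2, and 0 for n < 2.  No graph is built.
--
-- def _is_prime(m):
--     d = 2
--     while d * d <= m:
--         if m % d == 0:
--             return False
--         d += 1
--     return True
--
--
-- def count(n):
--     if n < 2:
--         return 0
--     total = 1
--     for i in range(max(3, n // 2 + 1), n + 1):
--         if _is_prime(i):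
--             total += 1
--     return total
-- ===== Notes on version B (the rewrite author's own statement) =====
-- stated objective: faster
-- what changed: B replaces A's O(n^2) divisibility-graph construction plus recursive DFS component counting by the arithmetic characterization of the components (one big component containing 2 plus a singleton for every prime p with 2p > n), so it just trial-division-counts the primes in (n//2, n].
import Mathlib
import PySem

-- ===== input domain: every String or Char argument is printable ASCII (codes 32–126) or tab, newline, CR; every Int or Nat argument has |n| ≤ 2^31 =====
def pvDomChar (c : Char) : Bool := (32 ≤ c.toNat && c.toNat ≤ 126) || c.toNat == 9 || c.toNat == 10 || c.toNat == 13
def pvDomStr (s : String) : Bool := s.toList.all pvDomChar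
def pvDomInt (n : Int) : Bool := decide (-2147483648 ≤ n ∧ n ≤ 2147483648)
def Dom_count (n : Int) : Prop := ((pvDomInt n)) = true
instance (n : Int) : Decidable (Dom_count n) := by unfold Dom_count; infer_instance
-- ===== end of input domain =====

-- B counts the components arithmetically (one component containing 2, plus a singleton per
-- prime p with 2p > n) instead of building A's divisibility graph and DFS-counting it.

-- ===== PORT A =====
-- curves = dict() ; curves[i] = [] for i in 2..n
def pvCurves0 (n : Int) : PySem.Dict Int (List Int) :=
  (PySem.List.pyRange 2 (n+1) 1).foldl (fun d i => d.insert i []) PySem.Dict.empty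

-- the double loop appending j to curves[i] and i to curves[j] when i divides j
def pvCurves (n : Int) : PySem.Dict Int (List Int) :=
  (PySem.List.pyRange 2 (n+1) 1).foldl (fun d i =>
    (PySem.List.pyRange (i+1) (n+1) 1).foldl (fun d' j =>
      if PySem.Int.mod j i == 0 then
        (d'.modify i [] (fun l => l ++ [j])).modify j [] (fun l => l ++ [i])
      else d') d) (pvCurves0 n)

-- recursive(a) with places_been threaded through; fuel only makes the recursion structural
-- (it is never exhausted on the vertices A visits: each call adds a fresh vertex to places_been)
mutual
def pvDfs (cur : PySem.Dict Int (List Int)) (C : PySem.Set Int) :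
    Nat → Int → PySem.Set Int → Bool × PySem.Set Int
  | 0, _, pb => (false, pb)
  | f+1, a, pb =>
    let pb1 := PySem.Set.add pb a
    if PySem.Set.contains C a then (false, pb1)
    else pvDfsL cur C f (cur.getD a []) pb1
  termination_by f _ _ => (f, 0)

def pvDfsL (cur : PySem.Dict Int (List Int)) (C : PySem.Set Int) :
    Nat → List Int → PySem.Set Int → Bool × PySem.Set Int
  | _, [], pb => (true, pb)
  | f, d :: ds, pb =>
    if PySem.Set.contains pb d then pvDfsL cur C f ds pb
    else
      match pvDfs cur C f d pb with
      | (false, pb') => (false, pb')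
      | (true, pb') => pvDfsL cur C f ds pb'
  termination_by f ds _ => (f, ds.length + 1)
end

def pvFuel (n : Int) : Nat := n.toNat + 2

def count (n : Int) : Int :=
  let cur := pvCurves n
  let comps := (PySem.Dict.keys cur).foldl (fun comps i =>
      if (pvDfs cur comps (pvFuel n) i PySem.Set.empty).1 then PySem.Set.add comps i
      else comps)
    PySem.Set.empty
  PySem.Set.len comps

-- ===== PORT B =====
-- while d*d <= m: … ; the '2 ≤ d' conjunct only justifies termination (d starts at 2 and grows)
def pvTrial (m : Int) (d : Int) : Bool :=
  if h : 2 ≤ d ∧ d * d ≤ m then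
    if PySem.Int.mod m d == 0 then false
    else pvTrial m (d+1)
  else true
  termination_by (m + 1 - d*d).toNat
  decreasing_by
    have h1 : d * d < (d+1) * (d+1) := by nlinarith [h.1]
    have h2 := h.2
    omega

def count_alt (n : Int) : Int :=
  if n < 2 then 0
  else
    (PySem.List.pyRange (max 3 (PySem.Int.floordiv n 2 + 1)) (n+1) 1).foldl
      (fun t i => if pvTrial i 2 then t + 1 else t) 1

-- ===== PRECONDITION & SPEC =====
def Spec_count (n : Int) (out : Int) : Prop := out = count_alt n
instance (n : Int) (out : Int) : Decidable (Spec_count n out) := by unfold Spec_count; infer_instance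

-- ===== CLAIM (what is proved, stated in full; the proofs are below) =====
def Claim_equal_count : Prop := ∀ (n : Int), Dom_count n → Spec_count n (count n)

-- ===== LEMMAS AND PROOFS =====

-- the divisibility graph on vertices 2..n
def pvEdge (n i j : Int) : Prop :=
  2 ≤ i ∧ 2 ≤ j ∧ i ≤ n ∧ j ≤ n ∧ ((i < j ∧ i ∣ j) ∨ (j < i ∧ j ∣ i))

def pvReach (n : Int) : Int → Int → Prop := Relation.ReflTransGen (pvEdge n)

-- i is the least vertex of its connected component
def pvIsMin (n i : Int) : Prop := ∀ j, pvReach n i j → i ≤ j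

noncomputable def pvMinB (n i : Int) : Bool := @decide (pvIsMin n i) (Classical.propDecidable _)

theorem pvMinB_iff (n i : Int) : pvMinB n i = true ↔ pvIsMin n i := by
  simp [pvMinB]

theorem pvReach_range {n i j : Int} (h2 : 2 ≤ i) (hn : i ≤ n) (h : pvReach n i j) :
    2 ≤ j ∧ j ≤ n := by
  induction h with
  | refl => exact ⟨h2, hn⟩
  | tail _ e _ => exact ⟨e.2.1, e.2.2.2.1⟩

-- ---- curves characterization ----
theorem pvInit_getD (l : List Int) :
    ∀ (d : PySem.Dict Int (List Int)) (k : Int),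
      (l.foldl (fun d i => d.insert i ([] : List Int)) d).getD k [] =
        if k ∈ l then [] else d.getD k [] := by
  induction l with
  | nil => intro d k; simp
  | cons i t ih =>
    intro d k
    simp only [List.foldl_cons, ih, List.mem_cons]
    by_cases ht : k ∈ t
    · simp [ht]
    · by_cases hi : k = i
      · simp [ht, hi, PySem.Dict.getD_insert]
      · simp [ht, hi, PySem.Dict.getD_insert]

theorem pvInit_keys (l : List Int) :
    ∀ (d : PySem.Dict Int (List Int)), l.Nodup → (∀ x ∈ l, d.contains x = false) →
      (l.foldl (fun d i => d.insert i ([] : List Int)) d).keys = d.keys ++ l := by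
  induction l with
  | nil => intro d _ _; simp
  | cons i t ih =>
    intro d hnd hc
    simp only [List.foldl_cons]
    rw [ih _ hnd.of_cons]
    · rw [PySem.Dict.keys_insert_of_not_contains _ _ (hc i (by simp))]
      simp
    · intro x hx
      have hxi : x ≠ i := fun h => (List.nodup_cons.mp hnd).1 (h ▸ hx)
      rw [PySem.Dict.contains_insert]
      simp [hxi, hc x (List.mem_cons_of_mem _ hx)]

theorem pvCurves0_getD (n k : Int) : (pvCurves0 n).getD k [] = [] := by
  unfold pvCurves0
  rw [pvInit_getD]
  split <;> simp [PySem.Dict.getD_empty]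

theorem pvCurves0_keys (n : Int) : (pvCurves0 n).keys = PySem.List.pyRange 2 (n+1) 1 := by
  unfold pvCurves0
  rw [pvInit_keys _ _ (PySem.List.nodup_pyRange_one _ _) (fun x _ => PySem.Dict.contains_empty x)]
  simp [PySem.Dict.keys_empty]

theorem pvKeys_modify_of_mem {d : PySem.Dict Int (List Int)} {k : Int} (d0 : List Int)
    (f : List Int → List Int) (h : k ∈ d.keys) : (d.modify k d0 f).keys = d.keys := by
  rw [PySem.Dict.keys_modify, PySem.Dict.keys_insert_of_contains]
  exact (PySem.Dict.contains_iff_mem_keys d k).mpr h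

-- the inner loop body of the curves construction
def pvStep (d' : PySem.Dict Int (List Int)) (i j : Int) : PySem.Dict Int (List Int) :=
  if PySem.Int.mod j i == 0 then
    (d'.modify i [] (fun l => l ++ [j])).modify j [] (fun l => l ++ [i])
  else d'

theorem pvStep_keys (d : PySem.Dict Int (List Int)) (i j : Int)
    (hi : i ∈ d.keys) (hj : j ∈ d.keys) : (pvStep d i j).keys = d.keys := by
  unfold pvStep
  split
  · rw [pvKeys_modify_of_mem _ _ (by rw [pvKeys_modify_of_mem _ _ hi]; exact hj),
      pvKeys_modify_of_mem _ _ hi]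
  · rfl

theorem pvCurves_eq (n : Int) : pvCurves n =
    (PySem.List.pyRange 2 (n+1) 1).foldl (fun d i =>
      (PySem.List.pyRange (i+1) (n+1) 1).foldl (fun d' j => pvStep d' i j) d) (pvCurves0 n) := rfl

theorem pvInner_keys (n i : Int) (hi2 : 2 ≤ i) (hin : i ≤ n) :
    ∀ (J : Int), i + 1 ≤ J → J ≤ n + 1 →
    ∀ (d : PySem.Dict Int (List Int)), d.keys = PySem.List.pyRange 2 (n+1) 1 →
      ((PySem.List.pyRange (i+1) J 1).foldl (fun d' j => pvStep d' i j) d).keys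
        = PySem.List.pyRange 2 (n+1) 1 := by
  intro J
  induction hJ : (J - (i+1)).toNat generalizing J with
  | zero =>
    intro h1 _ d hd
    rw [PySem.List.pyRange_one_eq_nil (by omega)]
    simpa using hd
  | succ m ih =>
    intro h1 h2 d hd
    have hJ1 : i + 1 ≤ J - 1 := by omega
    have : PySem.List.pyRange (i+1) J 1 = PySem.List.pyRange (i+1) (J-1) 1 ++ [J-1] := by
      have := PySem.List.pyRange_one_succ_right (a := i+1) (b := J-1) hJ1
      simpa using this
    rw [this, List.foldl_append]
    have hkeys := ih (J-1) (by omega) hJ1 (by omega) d hd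
    simp only [List.foldl_cons, List.foldl_nil]
    rw [pvStep_keys _ _ _ (by rw [hkeys, PySem.List.mem_pyRange_one]; omega)
      (by rw [hkeys, PySem.List.mem_pyRange_one]; omega)]
    exact hkeys

theorem pvCurves_keys (n : Int) : (pvCurves n).keys = PySem.List.pyRange 2 (n+1) 1 := by
  rw [pvCurves_eq]
  have : ∀ (l : List Int), (∀ x ∈ l, 2 ≤ x ∧ x ≤ n) →
      ∀ (d : PySem.Dict Int (List Int)), d.keys = PySem.List.pyRange 2 (n+1) 1 →
      (l.foldl (fun d i =>
        (PySem.List.pyRange (i+1) (n+1) 1).foldl (fun d' j => pvStep d' i j) d) d).keys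
        = PySem.List.pyRange 2 (n+1) 1 := by
    intro l
    induction l with
    | nil => intro _ d hd; simpa using hd
    | cons i t ih =>
      intro hmem d hd
      simp only [List.foldl_cons]
      have hi := hmem i (by simp)
      exact ih (fun x hx => hmem x (List.mem_cons_of_mem _ hx)) _
        (pvInner_keys n i hi.1 hi.2 (n+1) (by omega) (by omega) d hd)
  exact this _ (fun x hx => by rw [PySem.List.mem_pyRange_one] at hx; omega) _ (pvCurves0_keys n)

theorem pvStep_getD (d : PySem.Dict Int (List Int)) (i j : Int) (hij : i ≠ j) (a b : Int) :
    (b ∈ (pvStep d i j).getD a []) ↔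
      (b ∈ d.getD a [] ∨ (i ∣ j ∧ ((a = i ∧ b = j) ∨ (a = j ∧ b = i)))) := by
  unfold pvStep
  by_cases hdvd : PySem.Int.mod j i == 0
  · have hdv : i ∣ j := by
      rw [beq_iff_eq] at hdvd
      exact (PySem.Int.mod_eq_zero_iff_dvd j i).mp hdvd
    simp only [hdvd, if_true]
    rw [PySem.Dict.getD_modify, PySem.Dict.getD_modify]
    by_cases haj : a = j
    · subst haj
      simp [hij.symm, hdv, List.mem_append]
    · by_cases hai : a = i
      · subst hai
        simp [haj, hdv, List.mem_append]
      · rw [PySem.Dict.getD_modify]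
        simp [haj, hai, hdv]
  · have hdv : ¬ (i ∣ j) := by
      intro h
      exact hdvd (by rw [beq_iff_eq]; exact (PySem.Int.mod_eq_zero_iff_dvd j i).mpr h)
    simp [hdvd, hdv]

theorem pvInner_getD (n i : Int) (hi2 : 2 ≤ i) (hin : i ≤ n) :
    ∀ (J : Int), i + 1 ≤ J → J ≤ n + 1 →
    ∀ (d : PySem.Dict Int (List Int)),
      (∀ a b, b ∈ d.getD a [] ↔ (pvEdge n a b ∧ min a b < i)) →
      ∀ a b, b ∈ ((PySem.List.pyRange (i+1) J 1).foldl (fun d' j => pvStep d' i j) d).getD a []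
        ↔ (pvEdge n a b ∧ (min a b < i ∨ (min a b = i ∧ max a b < J))) := by
  intro J
  induction hJ : (J - (i+1)).toNat generalizing J with
  | zero =>
    intro h1 _ d hd a b
    rw [PySem.List.pyRange_one_eq_nil (by omega), List.foldl_nil, hd]
    constructor
    · rintro ⟨he, hm⟩; exact ⟨he, Or.inl hm⟩
    · rintro ⟨he, hm | ⟨hm1, hm2⟩⟩
      · exact ⟨he, hm⟩
      · exfalso
        obtain ⟨e1, e2, e3, e4, e5⟩ := he
        rcases e5 with ⟨hlt, _⟩ | ⟨hlt, _⟩ <;> simp [min_def, max_def] at hm1 hm2 <;> omega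
  | succ m ih =>
    intro h1 h2 d hd a b
    have hJ1 : i + 1 ≤ J - 1 := by omega
    have hsplit : PySem.List.pyRange (i+1) J 1 = PySem.List.pyRange (i+1) (J-1) 1 ++ [J-1] := by
      have := PySem.List.pyRange_one_succ_right (a := i+1) (b := J-1) hJ1
      simpa using this
    rw [hsplit, List.foldl_append]
    simp only [List.foldl_cons, List.foldl_nil]
    rw [pvStep_getD _ _ _ (by omega), ih (J-1) (by omega) hJ1 (by omega) d hd]
    set j := J - 1 with hj
    constructor
    · rintro (⟨he, hm⟩ | ⟨hdv, ⟨ha, hb⟩ | ⟨ha, hb⟩⟩)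
      · exact ⟨he, by rcases hm with h | ⟨hm1, hm2⟩; exact Or.inl h; exact Or.inr ⟨hm1, by omega⟩⟩
      · subst ha; subst hb
        refine ⟨⟨hi2, by omega, hin, by omega, Or.inl ⟨by omega, hdv⟩⟩, Or.inr ?_⟩
        constructor
        · simp [min_def]; omega
        · simp [max_def]; omega
      · subst ha; subst hb
        refine ⟨⟨by omega, hi2, by omega, hin, Or.inr ⟨by omega, hdv⟩⟩, Or.inr ?_⟩
        constructor
        · simp [min_def]; omega
        · simp [max_def]; omega
    · rintro ⟨he, hm | ⟨hm1, hm2⟩⟩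
      · exact Or.inl ⟨he, Or.inl hm⟩
      · by_cases hmax : max a b < j
        · exact Or.inl ⟨he, Or.inr ⟨hm1, hmax⟩⟩
        · have hmaxj : max a b = j := by omega
          obtain ⟨e1, e2, e3, e4, e5⟩ := he
          rcases e5 with ⟨hlt, hdv⟩ | ⟨hlt, hdv⟩
          · have : a = i ∧ b = j := by
              constructor <;> [skip; skip] <;> simp [min_def] at hm1 <;> simp [max_def] at hmaxj <;> omega
            exact Or.inr ⟨this.1 ▸ this.2 ▸ hdv, Or.inl this⟩
          · have : a = j ∧ b = i := by
              constructor <;> [skip; skip] <;> simp [min_def] at hm1 <;> simp [max_def] at hmaxj <;> omega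
            exact Or.inr ⟨this.1 ▸ this.2 ▸ hdv, Or.inr this⟩

theorem pvCurves_mem (n : Int) (i j : Int) :
    j ∈ (pvCurves n).getD i [] ↔ pvEdge n i j := by
  rw [pvCurves_eq]
  have main : ∀ (I : Int), 2 ≤ I → I ≤ n + 1 →
      ∀ a b, b ∈ ((PySem.List.pyRange 2 I 1).foldl (fun d i =>
        (PySem.List.pyRange (i+1) (n+1) 1).foldl (fun d' j => pvStep d' i j) d)
          (pvCurves0 n)).getD a []
        ↔ (pvEdge n a b ∧ min a b < I) := by
    intro I
    induction hI : (I - 2).toNat generalizing I with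
    | zero =>
      intro h1 _ a b
      rw [PySem.List.pyRange_one_eq_nil (by omega), List.foldl_nil, pvCurves0_getD]
      constructor
      · intro h; exact absurd h (List.not_mem_nil)
      · rintro ⟨⟨e1, e2, _⟩, hm⟩
        exfalso; simp [min_def] at hm; omega
    | succ m ih =>
      intro h1 h2 a b
      have hI1 : (2:Int) ≤ I - 1 := by omega
      have hsplit : PySem.List.pyRange 2 I 1 = PySem.List.pyRange 2 (I-1) 1 ++ [I-1] := by
        have := PySem.List.pyRange_one_succ_right (a := 2) (b := I-1) hI1
        simpa using this
      rw [hsplit, List.foldl_append]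
      simp only [List.foldl_cons, List.foldl_nil]
      rw [pvInner_getD n (I-1) hI1 (by omega) (n+1) (by omega) (by omega) _
        (fun a b => ih (I-1) (by omega) hI1 (by omega) a b)]
      constructor
      · rintro ⟨he, hm | ⟨hm1, hm2⟩⟩
        · exact ⟨he, by omega⟩
        · exact ⟨he, by omega⟩
      · rintro ⟨he, hm⟩
        refine ⟨he, ?_⟩
        by_cases h : min a b < I - 1
        · exact Or.inl h
        · refine Or.inr ⟨by omega, ?_⟩
          obtain ⟨e1, e2, e3, e4, _⟩ := he
          simp [max_def]; omega
  by_cases hn : 2 ≤ n + 1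
  · rw [main (n+1) hn (le_refl _)]
    constructor
    · rintro ⟨he, _⟩; exact he
    · intro he
      refine ⟨he, ?_⟩
      obtain ⟨e1, e2, e3, e4, _⟩ := he
      simp [min_def]; omega
  · rw [PySem.List.pyRange_one_eq_nil (by omega), List.foldl_nil, pvCurves0_getD]
    constructor
    · intro h; exact absurd h (List.not_mem_nil)
    · rintro ⟨e1, e2, e3, _⟩; omega

-- ---- DFS lemmas ----
theorem pvMonoAll (cur : PySem.Dict Int (List Int)) (C : PySem.Set Int) :
    ∀ f : Nat,
      (∀ (a : Int) (pb : PySem.Set Int), ∀ x ∈ pb, x ∈ (pvDfs cur C f a pb).2) ∧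
      (∀ (ds : List Int) (pb : PySem.Set Int), ∀ x ∈ pb, x ∈ (pvDfsL cur C f ds pb).2) := by
  intro f
  induction f with
  | zero =>
    constructor
    · intro a pb x hx; rw [pvDfs]; exact hx
    · intro ds
      induction ds with
      | nil => intro pb x hx; rw [pvDfsL]; exact hx
      | cons d ds ih =>
        intro pb x hx
        rw [pvDfsL]
        split
        · exact ih pb x hx
        · rw [pvDfs]; exact hx
  | succ f ihf =>
    have hdfs : ∀ (a : Int) (pb : PySem.Set Int), ∀ x ∈ pb, x ∈ (pvDfs cur C (f+1) a pb).2 := by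
      intro a pb x hx
      rw [pvDfs]
      have hx1 : x ∈ PySem.Set.add pb a := (PySem.Set.mem_add pb a x).mpr (Or.inl hx)
      split
      · exact hx1
      · exact ihf.2 _ _ x hx1
    refine ⟨hdfs, ?_⟩
    intro ds
    induction ds with
    | nil => intro pb x hx; rw [pvDfsL]; exact hx
    | cons d ds ih =>
      intro pb x hx
      rw [pvDfsL]
      split
      · exact ih pb x hx
      · rcases hres : pvDfs cur C (f+1) d pb with ⟨r, pb2⟩
        have hx2 : x ∈ pb2 := by
          have := hdfs d pb x hx; rw [hres] at this; exact this
        cases r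
        · exact hx2
        · exact ih pb2 x hx2

-- everything true-returning DFS guarantees: a is visited, nothing of C was seen,
-- every newly visited vertex is reachable from a and fully explored
theorem pvTrueAll (n : Int) (cur : PySem.Dict Int (List Int)) (C : PySem.Set Int)
    (hcur : ∀ a b, b ∈ cur.getD a [] ↔ pvEdge n a b) :
    ∀ f : Nat,
      (∀ (a : Int) (pb pb' : PySem.Set Int), pvDfs cur C f a pb = (true, pb') →
        a ∉ C ∧ a ∈ pb' ∧ (∀ x ∈ pb, x ∈ pb') ∧
        (∀ x ∈ pb', x ∈ pb ∨ pvReach n a x) ∧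
        (∀ x ∈ pb', x ∉ pb → x ∉ C ∧ ∀ y, pvEdge n x y → y ∈ pb')) ∧
      (∀ (a : Int) (ds : List Int) (pb pb' : PySem.Set Int),
        (∀ d ∈ ds, pvEdge n a d) → pvDfsL cur C f ds pb = (true, pb') →
        (∀ x ∈ pb, x ∈ pb') ∧ (∀ d ∈ ds, d ∈ pb') ∧
        (∀ x ∈ pb', x ∈ pb ∨ ∃ d ∈ ds, pvReach n d x) ∧
        (∀ x ∈ pb', x ∉ pb → x ∉ C ∧ ∀ y, pvEdge n x y → y ∈ pb')) := by
  intro f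
  induction f with
  | zero =>
    constructor
    · intro a pb pb' h; rw [pvDfs] at h; exact absurd h (by simp)
    · intro a ds
      induction ds with
      | nil =>
        intro pb pb' _ h
        rw [pvDfsL] at h
        obtain ⟨-, rfl⟩ : true = true ∧ pb = pb' := by
          constructor; rfl; exact congrArg Prod.snd h
        exact ⟨fun x hx => hx, by simp, fun x hx => Or.inl hx, fun x hx hnx => absurd hx hnx⟩
      | cons d ds ih =>
        intro pb pb' hE h
        rw [pvDfsL] at h
        split at h
        · rename_i hd
          have hdpb : d ∈ pb := (PySem.Set.contains_iff pb d).mp hd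
          obtain ⟨h1, h2, h3, h4⟩ := ih pb pb' (fun x hx => hE x (List.mem_cons_of_mem _ hx)) h
          refine ⟨h1, ?_, ?_, h4⟩
          · intro e he
            rcases List.mem_cons.mp he with rfl | he'
            · exact h1 _ hdpb
            · exact h2 e he'
          · intro x hx
            rcases h3 x hx with hx' | ⟨d', hd', hr⟩
            · exact Or.inl hx'
            · exact Or.inr ⟨d', List.mem_cons_of_mem _ hd', hr⟩
        · rw [pvDfs] at h
          exact absurd h (by simp)
  | succ f ihf =>
    have hdfs : ∀ (a : Int) (pb pb' : PySem.Set Int), pvDfs cur C (f+1) a pb = (true, pb') →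
        a ∉ C ∧ a ∈ pb' ∧ (∀ x ∈ pb, x ∈ pb') ∧
        (∀ x ∈ pb', x ∈ pb ∨ pvReach n a x) ∧
        (∀ x ∈ pb', x ∉ pb → x ∉ C ∧ ∀ y, pvEdge n x y → y ∈ pb') := by
      intro a pb pb' h
      rw [pvDfs] at h
      split at h
      · exact absurd h (by simp)
      · rename_i hC
        have hCa : a ∉ C := fun hm => hC ((PySem.Set.contains_iff C a).mpr hm)
        obtain ⟨hsub, hds, hreach, hclos⟩ :=
          ihf.2 a (cur.getD a []) (PySem.Set.add pb a) pb' (fun d hd => (hcur a d).mp hd) h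
        have hmem_a : a ∈ PySem.Set.add pb a := (PySem.Set.mem_add pb a a).mpr (Or.inr rfl)
        refine ⟨hCa, hsub a hmem_a,
          fun x hx => hsub x ((PySem.Set.mem_add pb a x).mpr (Or.inl hx)), ?_, ?_⟩
        · intro x hx
          rcases hreach x hx with hx1 | ⟨d, hd, hRdx⟩
          · rcases (PySem.Set.mem_add pb a x).mp hx1 with h' | h'
            · exact Or.inl h'
            · exact Or.inr (h' ▸ Relation.ReflTransGen.refl)
          · exact Or.inr (Relation.ReflTransGen.head ((hcur a d).mp hd) hRdx)
        · intro x hx hxpb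
          by_cases hx1 : x ∈ PySem.Set.add pb a
          · have hxa : x = a := by
              rcases (PySem.Set.mem_add pb a x).mp hx1 with h' | h'
              · exact absurd h' hxpb
              · exact h'
            subst hxa
            exact ⟨hCa, fun y hy => hds y ((hcur x y).mpr hy)⟩
          · exact hclos x hx hx1
    refine ⟨hdfs, ?_⟩
    intro a ds
    induction ds with
    | nil =>
      intro pb pb' _ h
      rw [pvDfsL] at h
      obtain rfl : pb = pb' := congrArg Prod.snd h
      exact ⟨fun x hx => hx, by simp, fun x hx => Or.inl hx, fun x hx hnx => absurd hx hnx⟩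
    | cons d ds ih =>
      intro pb pb' hE h
      rw [pvDfsL] at h
      split at h
      · rename_i hd
        have hdpb : d ∈ pb := (PySem.Set.contains_iff pb d).mp hd
        obtain ⟨h1, h2, h3, h4⟩ := ih pb pb' (fun x hx => hE x (List.mem_cons_of_mem _ hx)) h
        refine ⟨h1, ?_, ?_, h4⟩
        · intro e he
          rcases List.mem_cons.mp he with rfl | he'
          · exact h1 _ hdpb
          · exact h2 e he'
        · intro x hx
          rcases h3 x hx with hx' | ⟨d', hd', hr⟩
          · exact Or.inl hx'
          · exact Or.inr ⟨d', List.mem_cons_of_mem _ hd', hr⟩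
      · rcases hres : pvDfs cur C (f+1) d pb with ⟨r, pb2⟩
        rw [hres] at h
        cases r
        · exact absurd h (by simp)
        · obtain ⟨T1C, T1a, T1sub, T1reach, T1clos⟩ := hdfs d pb pb2 hres
          obtain ⟨sub2, ds2, reach2, clos2⟩ :=
            ih pb2 pb' (fun x hx => hE x (List.mem_cons_of_mem _ hx)) h
          refine ⟨fun x hx => sub2 x (T1sub x hx), ?_, ?_, ?_⟩
          · intro e he
            rcases List.mem_cons.mp he with rfl | he'
            · exact sub2 e T1a
            · exact ds2 e he'
          · intro x hx
            rcases reach2 x hx with hx2 | ⟨d', hd', hr⟩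
            · rcases T1reach x hx2 with hx' | hr'
              · exact Or.inl hx'
              · exact Or.inr ⟨d, List.mem_cons_self, hr'⟩
            · exact Or.inr ⟨d', List.mem_cons_of_mem _ hd', hr⟩
          · intro x hx hxpb
            by_cases hx2 : x ∈ pb2
            · obtain ⟨hxC, hnb⟩ := T1clos x hx2 hxpb
              exact ⟨hxC, fun y hy => sub2 y (hnb y hy)⟩
            · exact clos2 x hx hx2

-- number of unvisited vertices (the fuel bound)
def pvUnvis (n : Int) (pb : PySem.Set Int) : Nat :=
  ((PySem.List.pyRange 2 (n+1) 1).filter (fun v => !(PySem.Set.contains pb v))).length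

theorem pvUnvis_mono (n : Int) (pb pb2 : PySem.Set Int) (h : ∀ x ∈ pb, x ∈ pb2) :
    pvUnvis n pb2 ≤ pvUnvis n pb := by
  apply List.Sublist.length_le
  apply List.monotone_filter_right
  intro v hv
  simp only [Bool.not_eq_true'] at hv ⊢
  rcases hcv : PySem.Set.contains pb v with _ | _
  · rfl
  · exfalso
    have : v ∈ pb2 := h v ((PySem.Set.contains_iff pb v).mp hcv)
    rw [(PySem.Set.contains_iff pb2 v).mpr this] at hv
    simp at hv

theorem pvUnvis_add_lt (n a : Int) (pb : PySem.Set Int)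
    (h2 : 2 ≤ a) (hn : a ≤ n) (hpb : a ∉ pb) :
    pvUnvis n (PySem.Set.add pb a) < pvUnvis n pb := by
  unfold pvUnvis
  have heq : (PySem.List.pyRange 2 (n+1) 1).filter
        (fun v => !(PySem.Set.contains (PySem.Set.add pb a) v))
      = ((PySem.List.pyRange 2 (n+1) 1).filter
          (fun v => !(PySem.Set.contains pb v))).filter (fun v => !(v == a)) := by
    rw [List.filter_filter]
    apply List.filter_congr
    intro x _
    apply Bool.eq_iff_iff.mpr
    simp only [Bool.not_eq_true', Bool.and_eq_true, Bool.not_eq_true, beq_eq_false_iff_ne]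
    constructor
    · intro hcon
      have hx : x ∉ PySem.Set.add pb a := fun hm =>
        by rw [(PySem.Set.contains_iff _ x).mpr hm] at hcon; simp at hcon
      rw [PySem.Set.mem_add] at hx
      push_neg at hx
      refine ⟨hx.2, ?_⟩
      rcases hc : PySem.Set.contains pb x with _ | _
      · rfl
      · exact absurd ((PySem.Set.contains_iff pb x).mp hc) hx.1
    · rintro ⟨hxa, hc⟩
      rcases hc2 : PySem.Set.contains (PySem.Set.add pb a) x with _ | _
      · rfl
      · exfalso
        have := (PySem.Set.contains_iff _ x).mp hc2
        rw [PySem.Set.mem_add] at this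
        rcases this with hm | rfl
        · rw [(PySem.Set.contains_iff pb x).mpr hm] at hc; simp at hc
        · exact hxa rfl
  rw [heq]
  apply List.length_filter_lt_length_iff_exists.mpr
  refine ⟨a, ?_, by simp⟩
  rw [List.mem_filter]
  constructor
  · rw [PySem.List.mem_pyRange_one]; omega
  · simp only [Bool.not_eq_true']
    rcases hc : PySem.Set.contains pb a with _ | _
    · rfl
    · exact absurd ((PySem.Set.contains_iff pb a).mp hc) hpb

-- a false-returning DFS (with enough fuel) really found a representative in C
theorem pvFalseAll (n : Int) (cur : PySem.Dict Int (List Int)) (C : PySem.Set Int)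
    (hcur : ∀ a b, b ∈ cur.getD a [] ↔ pvEdge n a b) :
    ∀ f : Nat,
      (∀ (a : Int) (pb pb' : PySem.Set Int), 2 ≤ a → a ≤ n → a ∉ pb → pvUnvis n pb < f →
        pvDfs cur C f a pb = (false, pb') → ∃ c ∈ C, pvReach n a c) ∧
      (∀ (a : Int) (ds : List Int) (pb pb' : PySem.Set Int),
        (∀ d ∈ ds, pvEdge n a d) → pvUnvis n pb < f →
        pvDfsL cur C f ds pb = (false, pb') → ∃ c ∈ C, pvReach n a c) := by
  intro f
  induction f with
  | zero =>
    exact ⟨fun a pb pb' _ _ _ hf => absurd hf (by omega),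
      fun a ds pb pb' _ hf => absurd hf (by omega)⟩
  | succ f ihf =>
    have hdfs : ∀ (a : Int) (pb pb' : PySem.Set Int), 2 ≤ a → a ≤ n → a ∉ pb →
        pvUnvis n pb < f + 1 → pvDfs cur C (f+1) a pb = (false, pb') →
        ∃ c ∈ C, pvReach n a c := by
      intro a pb pb' h2 hn hpb hf h
      rw [pvDfs] at h
      split at h
      · rename_i hC
        exact ⟨a, (PySem.Set.contains_iff C a).mp hC, Relation.ReflTransGen.refl⟩
      · have hlt : pvUnvis n (PySem.Set.add pb a) < f := by
          have := pvUnvis_add_lt n a pb h2 hn hpb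
          omega
        exact ihf.2 a (cur.getD a []) (PySem.Set.add pb a) pb'
          (fun d hd => (hcur a d).mp hd) hlt h
    refine ⟨hdfs, ?_⟩
    intro a ds
    induction ds with
    | nil =>
      intro pb pb' _ _ h
      rw [pvDfsL] at h
      exact absurd h (by simp)
    | cons d ds ih =>
      intro pb pb' hE hf h
      rw [pvDfsL] at h
      split at h
      · exact ih pb pb' (fun x hx => hE x (List.mem_cons_of_mem _ hx)) hf h
      · rename_i hd
        have hdpb : d ∉ pb := fun hm => hd ((PySem.Set.contains_iff pb d).mpr hm)
        have hEd := hE d List.mem_cons_self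
        rcases hres : pvDfs cur C (f+1) d pb with ⟨r, pb2⟩
        rw [hres] at h
        cases r
        · obtain ⟨c, hc, hr⟩ := hdfs d pb pb2 hEd.2.1 hEd.2.2.2.1 hdpb hf hres
          exact ⟨c, hc, Relation.ReflTransGen.head hEd hr⟩
        · have hsub : ∀ x ∈ pb, x ∈ pb2 := by
            intro x hx
            have := (pvMonoAll cur C (f+1)).1 d pb x hx
            rw [hres] at this; exact this
          have hf2 : pvUnvis n pb2 < f + 1 := by
            have := pvUnvis_mono n pb pb2 hsub
            omega
          exact ih pb2 pb' (fun x hx => hE x (List.mem_cons_of_mem _ hx)) hf2 h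

-- with pb = ∅ and a true result, nothing in C is reachable from a
theorem pvDfs_true_no_reach (n : Int) (cur : PySem.Dict Int (List Int)) (C : PySem.Set Int)
    (hcur : ∀ a b, b ∈ cur.getD a [] ↔ pvEdge n a b)
    (f : Nat) (a : Int) (pb' : PySem.Set Int)
    (h : pvDfs cur C f a PySem.Set.empty = (true, pb')) :
    ∀ c ∈ C, ¬ pvReach n a c := by
  obtain ⟨hCa, ha, _, _, hclos⟩ := (pvTrueAll n cur C hcur f).1 a PySem.Set.empty pb' h
  have hreach_in : ∀ j, pvReach n a j → j ∈ pb' := by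
    intro j hj
    induction hj with
    | refl => exact ha
    | tail hR e ihr =>
      rename_i b c'
      exact (hclos b ihr (by simp [PySem.Set.empty])).2 c' e
  intro c hc hr
  exact (hclos c (hreach_in c hr) (by simp [PySem.Set.empty])).1 hc
-- ---- every non-minimal vertex has a minimal representative below it ----
theorem pvDescend (n I : Int) (h2 : 2 ≤ I) (hn : I ≤ n) :
    ∀ j, pvReach n I j → j < I → ∃ c, pvReach n I c ∧ pvIsMin n c ∧ 2 ≤ c ∧ c < I := by
  suffices H : ∀ (k : Nat), ∀ j, j.toNat = k → pvReach n I j → j < I →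
      ∃ c, pvReach n I c ∧ pvIsMin n c ∧ 2 ≤ c ∧ c < I by
    exact fun j h1 hlt => H j.toNat j rfl h1 hlt
  intro k
  induction k using Nat.strong_induction_on with
  | _ k ih =>
    intro j hk hre hlt
    have hj2 : 2 ≤ j := (pvReach_range h2 hn hre).1
    by_cases hm : pvIsMin n j
    · exact ⟨j, hre, hm, hj2, hlt⟩
    · unfold pvIsMin at hm
      simp only [not_forall, not_le] at hm
      obtain ⟨j', hrj', hlt'⟩ := hm
      have hj'2 : 2 ≤ j' := (pvReach_range hj2 (pvReach_range h2 hn hre).2 hrj').1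
      exact ih j'.toNat (by omega) j' rfl (Relation.ReflTransGen.trans hre hrj') (by omega)

-- ---- arithmetic characterization of the component minima ----
theorem pvNoEdge_of_big_prime (n i : Int) (h3 : 2 < i) (hp : Nat.Prime i.toNat)
    (hbig : n < 2*i) : ∀ y, ¬ pvEdge n i y := by
  rintro y ⟨e1, e2, e3, e4, e5⟩
  rcases e5 with ⟨hlt, k, hk⟩ | ⟨hlt, hdv⟩
  · have hi0 : (0:Int) < i := by omega
    have hk2 : 2 ≤ k := by nlinarith
    nlinarith
  · have hy0 : (0:Int) ≤ y := by omega
    have hi0 : (0:Int) ≤ i := by omega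
    have hdvn : y.toNat ∣ i.toNat := by
      rw [← Int.toNat_of_nonneg hy0, ← Int.toNat_of_nonneg hi0] at hdv
      exact_mod_cast hdv
    rcases Nat.Prime.eq_one_or_self_of_dvd hp _ hdvn with h1 | h1 <;> omega

theorem pvIsMin_iff (n i : Int) (h2 : 2 ≤ i) (hn : i ≤ n) :
    pvIsMin n i ↔ (i = 2 ∨ (2 < i ∧ Nat.Prime i.toNat ∧ n < 2*i)) := by
  constructor
  · intro hmin
    by_cases hi2 : i = 2
    · exact Or.inl hi2
    refine Or.inr ⟨by omega, ?_, ?_⟩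
    · by_contra hnp
      obtain ⟨m, hdvd, hm2, hmlt⟩ := Nat.exists_dvd_of_not_prime2 (by omega : 2 ≤ i.toNat) hnp
      have hdvi : (m : Int) ∣ i := by
        have := Int.natCast_dvd_natCast.mpr hdvd
        rwa [Int.toNat_of_nonneg (by omega : (0:Int) ≤ i)] at this
      have hEdge : pvEdge n i (m : Int) :=
        ⟨h2, by omega, hn, by omega, Or.inr ⟨by omega, hdvi⟩⟩
      have := hmin (m : Int) (Relation.ReflTransGen.single hEdge)
      omega
    · by_contra hsmall
      have h2i : 2*i ≤ n := by omega
      have hE1 : pvEdge n i (2*i) := ⟨h2, by omega, hn, by omega, Or.inl ⟨by omega, ⟨2, by ring⟩⟩⟩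
      have hE2 : pvEdge n (2*i) 2 := ⟨by omega, by omega, by omega, by omega,
        Or.inr ⟨by omega, ⟨i, by ring⟩⟩⟩
      have := hmin 2 (Relation.ReflTransGen.head hE1 (Relation.ReflTransGen.single hE2))
      omega
  · rintro (rfl | ⟨h3, hp, hbig⟩)
    · intro j hj
      exact (pvReach_range h2 hn hj).1
    · intro j hj
      rcases Relation.ReflTransGen.cases_head hj with rfl | ⟨b, hE, _⟩
      · exact le_refl _
      · exact absurd hE (pvNoEdge_of_big_prime n i h3 hp hbig b)

-- ---- the outer loop of A keeps exactly the component minima seen so far ----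
theorem pvUnvis_empty (n : Int) : pvUnvis n PySem.Set.empty = (n - 1).toNat := by
  unfold pvUnvis
  rw [List.filter_eq_self.mpr (by intro v _; rfl)]
  rw [PySem.List.length_pyRange_one]
  omega

theorem pvLoop (n : Int) : ∀ (I : Int), 2 ≤ I → I ≤ n + 1 →
    (PySem.List.pyRange 2 I 1).foldl (fun comps i =>
        if (pvDfs (pvCurves n) comps (pvFuel n) i PySem.Set.empty).1 then PySem.Set.add comps i
        else comps) PySem.Set.empty
      = (PySem.List.pyRange 2 I 1).filter (pvMinB n) := by
  intro I
  induction hI : (I - 2).toNat generalizing I with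
  | zero =>
    intro h1 h2
    have : I = 2 := by omega
    subst this
    rw [PySem.List.pyRange_one_eq_nil (by omega)]
    rfl
  | succ m ih =>
    intro h1 h2
    have hI1 : (2:Int) ≤ I - 1 := by omega
    have hsplit : PySem.List.pyRange 2 I 1 = PySem.List.pyRange 2 (I-1) 1 ++ [I-1] := by
      have := PySem.List.pyRange_one_succ_right (a := 2) (b := I-1) hI1
      simpa using this
    rw [hsplit, List.foldl_append, List.filter_append, ih (I-1) (by omega) hI1 (by omega)]
    set C := (PySem.List.pyRange 2 (I-1) 1).filter (pvMinB n) with hCdef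
    have hC_range : ∀ c ∈ C, 2 ≤ c ∧ c < I - 1 := by
      intro c hc
      have := (List.mem_filter.mp hc).1
      rw [PySem.List.mem_pyRange_one] at this
      omega
    have hC_min : ∀ c ∈ C, pvIsMin n c := by
      intro c hc
      exact (pvMinB_iff n c).mp (List.mem_filter.mp hc).2
    have hfuel : pvUnvis n PySem.Set.empty < pvFuel n := by
      rw [pvUnvis_empty]; unfold pvFuel; omega
    simp only [List.foldl_cons, List.foldl_nil]
    by_cases hmin : pvIsMin n (I-1)
    · have htrue : (pvDfs (pvCurves n) C (pvFuel n) (I-1) PySem.Set.empty).1 = true := by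
        rcases hres : pvDfs (pvCurves n) C (pvFuel n) (I-1) PySem.Set.empty with ⟨r, pb'⟩
        cases r
        · exfalso
          obtain ⟨c, hc, hr⟩ := (pvFalseAll n (pvCurves n) C (pvCurves_mem n) (pvFuel n)).1
            (I-1) PySem.Set.empty pb' hI1 (by omega) (by simp [PySem.Set.empty]) hfuel hres
          have := hmin c hr
          have := hC_range c hc
          omega
        · rfl
      rw [if_pos htrue]
      have hnotin : (I-1) ∉ C := fun hm => by have := hC_range _ hm; omega
      rw [PySem.Set.add_of_not_mem hnotin]
      have : List.filter (pvMinB n) [I-1] = [I-1] := by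
        simp [List.filter, (pvMinB_iff n (I-1)).mpr hmin]
      rw [this]
    · have hfalse : (pvDfs (pvCurves n) C (pvFuel n) (I-1) PySem.Set.empty).1 = false := by
        rcases hres : pvDfs (pvCurves n) C (pvFuel n) (I-1) PySem.Set.empty with ⟨r, pb'⟩
        cases r
        · rfl
        · exfalso
          have hnor := pvDfs_true_no_reach n (pvCurves n) C (pvCurves_mem n) (pvFuel n)
            (I-1) pb' hres
          unfold pvIsMin at hmin
          simp only [not_forall, not_le] at hmin
          obtain ⟨j, hrj, hjlt⟩ := hmin
          obtain ⟨c, hrc, hcmin, hc2, hclt⟩ := pvDescend n (I-1) hI1 (by omega) j hrj hjlt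
          have hcC : c ∈ C := by
            rw [hCdef, List.mem_filter]
            exact ⟨by rw [PySem.List.mem_pyRange_one]; omega, (pvMinB_iff n c).mpr hcmin⟩
          exact hnor c hcC hrc
      rw [if_neg (by rw [hfalse]; exact Bool.false_ne_true)]
      have : List.filter (pvMinB n) [I-1] = [] := by
        have : pvMinB n (I-1) = false := by
          rcases h : pvMinB n (I-1) with _ | _
          · rfl
          · exact absurd ((pvMinB_iff n (I-1)).mp h) hmin
        simp [List.filter, this]
      rw [this, List.append_nil]

theorem count_eq_filter (n : Int) (hn : 2 ≤ n) :
    count n = (((PySem.List.pyRange 2 (n+1) 1).filter (pvMinB n)).length : Int) := by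
  simp only [count]
  rw [pvCurves_keys, pvLoop n (n+1) (by omega) (le_refl _)]
  rfl

-- ---- B-side: trial division decides primality ----
theorem pvTrial_eq_true_iff (m : Int) : ∀ (d : Int), 2 ≤ d →
    (pvTrial m d = true ↔ ∀ e : Int, d ≤ e → e * e ≤ m → ¬ (e ∣ m)) := by
  suffices H : ∀ (k : Nat) (d : Int), (m + 1 - d*d).toNat = k → 2 ≤ d →
      (pvTrial m d = true ↔ ∀ e : Int, d ≤ e → e * e ≤ m → ¬ (e ∣ m)) by
    exact fun d hd => H _ d rfl hd
  intro k
  induction k using Nat.strong_induction_on with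
  | _ k ih =>
    intro d hk hd2
    rw [pvTrial]
    split
    · rename_i hg
      rcases hmod : (PySem.Int.mod m d == 0) with _ | _
      · simp only [hmod, Bool.false_eq_true, if_false]
        have hndvd : ¬ (d ∣ m) := fun hdv => by
          rw [(PySem.Int.mod_eq_zero_iff_dvd m d).mpr hdv] at hmod
          simp at hmod
        have hdec : (m + 1 - (d+1)*(d+1)).toNat < k := by
          have h1 : d * d < (d+1) * (d+1) := by nlinarith
          have h2 := hg.2
          omega
        rw [ih _ hdec (d+1) rfl (by omega)]
        constructor
        · intro hall e he hee hdvd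
          rcases eq_or_lt_of_le he with rfl | hlt
          · exact hndvd hdvd
          · exact hall e (by omega) hee hdvd
        · intro hall e he hee hdvd
          exact hall e (by omega) hee hdvd
      · simp only [hmod, if_true]
        refine ⟨fun h => absurd h (by simp), fun hall => ?_⟩
        exact False.elim (absurd ((PySem.Int.mod_eq_zero_iff_dvd m d).mp (beq_iff_eq.mp hmod))
          (hall d (le_refl d) hg.2))
    · rename_i hg
      have hlt : m < d * d := by
        by_contra hge
        exact hg ⟨hd2, by omega⟩
      simp only [true_iff]
      intro e he hee _
      have : d * d ≤ e * e := by nlinarith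
      omega

theorem pvTrial_iff_prime (i : Int) (h3 : 3 ≤ i) :
    pvTrial i 2 = true ↔ Nat.Prime i.toNat := by
  rw [pvTrial_eq_true_iff i 2 (by omega), Nat.prime_def_le_sqrt]
  have hi0 : (0:Int) ≤ i := by omega
  constructor
  · intro hall
    refine ⟨by omega, fun m hm2 hmsqrt hdvd => ?_⟩
    have hmm : m * m ≤ i.toNat := Nat.le_sqrt.mp hmsqrt
    refine hall (m : Int) (by omega) ?_ ?_
    · have : ((m * m : Nat) : Int) ≤ ((i.toNat : Nat) : Int) := by exact_mod_cast hmm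
      push_cast at this
      rwa [Int.toNat_of_nonneg hi0] at this
    · have := Int.natCast_dvd_natCast.mpr hdvd
      rwa [Int.toNat_of_nonneg hi0] at this
  · rintro ⟨-, hforall⟩ e he2 hee hdvd
    have he0 : (0:Int) ≤ e := by omega
    refine hforall e.toNat (by omega) (Nat.le_sqrt.mpr ?_) ?_
    · have : ((e.toNat * e.toNat : Nat) : Int) ≤ ((i.toNat : Nat) : Int) := by
        push_cast
        rw [Int.toNat_of_nonneg he0, Int.toNat_of_nonneg hi0]
        exact hee
      exact_mod_cast this
    · apply Int.natCast_dvd_natCast.mp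
      rw [Int.toNat_of_nonneg he0, Int.toNat_of_nonneg hi0]
      exact hdvd

theorem count_alt_eq (n : Int) (hn : 2 ≤ n) :
    count_alt n = 1 + (((PySem.List.pyRange (max 3 (PySem.Int.floordiv n 2 + 1)) (n+1) 1).countP
      (fun i => pvTrial i 2)) : Int) := by
  unfold count_alt
  rw [if_neg (by omega)]
  exact PySem.List.foldl_if_add_one _ _ _

-- ===== VERDICT (by name: the statement is the Claim_ definition above) =====
theorem count_spec : Claim_equal_count := by
  intro n _
  unfold Spec_count
  by_cases hn : n < 2
  · have hkeys : (pvCurves n).keys = [] := by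
      rw [pvCurves_keys]; exact PySem.List.pyRange_one_eq_nil (by omega)
    simp only [count, hkeys, List.foldl_nil]
    unfold count_alt
    rw [if_pos hn]
    rfl
  · have hn2 : (2:Int) ≤ n := by omega
    have hq : PySem.Int.floordiv n 2 = n / 2 := PySem.Int.floordiv_eq_ediv_of_pos (by omega)
    rw [count_eq_filter n hn2, count_alt_eq n hn2]
    rw [← List.countP_eq_length_filter]
    -- replace the classical minimality predicate by the arithmetic one
    have step1 : (PySem.List.pyRange 2 (n+1) 1).countP (pvMinB n)
        = (PySem.List.pyRange 2 (n+1) 1).countP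
            (fun i => decide (i = 2 ∨ (2 < i ∧ Nat.Prime i.toNat ∧ n < 2*i))) := by
      apply List.countP_congr
      intro x hx
      rw [PySem.List.mem_pyRange_one] at hx
      rw [pvMinB_iff, decide_eq_true_iff]
      exact pvIsMin_iff n x (by omega) (by omega)
    rw [step1]
    have hsplit2 : PySem.List.pyRange 2 (n+1) 1 = 2 :: PySem.List.pyRange 3 (n+1) 1 := by
      have := PySem.List.pyRange_one_cons (a := 2) (b := n+1) (by omega)
      simpa using this
    rw [hsplit2, List.countP_cons]
    simp only [show (decide ((2:Int) = 2 ∨ (2 < (2:Int) ∧ Nat.Prime (2:Int).toNat ∧ n < 2*2))) = true by simp]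
    set M : Int := max 3 (PySem.Int.floordiv n 2 + 1) with hM
    have hM3 : (3:Int) ≤ M := le_max_left _ _
    have hMq : PySem.Int.floordiv n 2 + 1 ≤ M := le_max_right _ _
    have hMn : M ≤ n + 1 := by
      rw [hM, hq]
      have : n / 2 + 1 ≤ n + 1 := by omega
      omega
    have hsplit3 : PySem.List.pyRange 3 (n+1) 1
        = PySem.List.pyRange 3 M 1 ++ PySem.List.pyRange M (n+1) 1 :=
      PySem.List.pyRange_one_append 3 M (n+1) hM3 hMn
    rw [hsplit3, List.countP_append]
    have hzero : (PySem.List.pyRange 3 M 1).countP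
        (fun i => decide (i = 2 ∨ (2 < i ∧ Nat.Prime i.toNat ∧ n < 2*i))) = 0 := by
      apply List.countP_eq_zero.mpr
      intro i hi
      rw [PySem.List.mem_pyRange_one] at hi
      have hi2n : 2*i ≤ n := by
        have : i < M := hi.2
        rw [hM] at this
        rcases lt_max_iff.mp this with h | h
        · omega
        · rw [hq] at h; omega
      simp only [decide_eq_true_iff, not_or]
      constructor
      · omega
      · rintro ⟨-, -, hbig⟩; omega
    rw [hzero]
    have hlast : (PySem.List.pyRange M (n+1) 1).countP
        (fun i => decide (i = 2 ∨ (2 < i ∧ Nat.Prime i.toNat ∧ n < 2*i)))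
        = (PySem.List.pyRange M (n+1) 1).countP (fun i => pvTrial i 2) := by
      apply List.countP_congr
      intro i hi
      rw [PySem.List.mem_pyRange_one] at hi
      have hi3 : 3 ≤ i := by omega
      have hbig : n < 2*i := by
        have : PySem.Int.floordiv n 2 + 1 ≤ i := le_trans hMq hi.1
        rw [hq] at this
        omega
      rw [decide_eq_true_iff, pvTrial_iff_prime i hi3]
      constructor
      · rintro (h | ⟨-, hp, -⟩)
        · omega
        · exact hp
      · intro hp
        exact Or.inr ⟨by omega, hp, hbig⟩
    rw [hlast]
    rw [if_pos (by simp)]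
    push_cast
    omega
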